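-- pv_equiv track=rewrite | github.com/qvizt/HackerRank-Solutions-Java | Python/Algorithms/Greedy/Priyanka and Toys.py | get_number_of_containers
-- ===== SOURCE A (Python) =====
-- def get_number_of_containers(weights):
--     weights.sort()
--     nr_containers = 1
--     current_weight_limit = weights[0] + 4
--
--     for i in range(1, len(weights)):
--         w = weights[i]
--         if w > current_weight_limit:
--             current_weight_limit = w + 4
--             nr_containers += 1
--
--     return nr_containers
-- ===== SOURCE B (Python) =====
-- def _bisect_right(a, x):
--     lo = 0
--     hi = len(a)
--     while lo < hi:
--         mid = (lo + hi) // 2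
--         if a[mid] <= x:
--             lo = mid + 1
--         else:
--             hi = mid
--     return lo
--
--
-- def get_number_of_containers(weights):
--     weights.sort()
--     n = len(weights)
--     count = 0
--     i = 0
--     while i < n:
--         count += 1
--         i = _bisect_right(weights, weights[i] + 4)
--     return count
-- ===== Notes on version B (the rewrite author's own statement) =====
-- stated objective: alternative
-- what changed: Instead of scanning every element against a running weight limit, B jumps container-by-container: from the first element of each container it binary-searches (hand-written bisect_right) for the first weight exceeding weight+4 and hops straight there, counting one container per hop.
import Mathlib
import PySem

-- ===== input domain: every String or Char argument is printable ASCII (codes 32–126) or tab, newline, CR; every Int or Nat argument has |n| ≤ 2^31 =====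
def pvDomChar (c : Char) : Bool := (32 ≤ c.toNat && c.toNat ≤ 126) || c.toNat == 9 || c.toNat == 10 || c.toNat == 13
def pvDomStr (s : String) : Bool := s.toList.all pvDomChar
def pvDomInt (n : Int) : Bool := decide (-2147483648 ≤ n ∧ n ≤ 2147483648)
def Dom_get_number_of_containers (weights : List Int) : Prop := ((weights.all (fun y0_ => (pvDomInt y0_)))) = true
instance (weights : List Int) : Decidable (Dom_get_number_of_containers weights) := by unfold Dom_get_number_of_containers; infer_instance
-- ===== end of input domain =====

-- B replaces A's linear limit-tracking scan by a container-by-container sweep using a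
-- hand-written binary search (alternative algorithm, same asymptotic cost: the sort dominates).
-- Both A and B sort `weights` in place; the equivalence proved here is about the return value.

-- ===== PORT A =====
def get_number_of_containers (weights : List Int) : Int :=
  let s := PySem.List.sorted weights (fun x => x) false
  -- the first-element read: in-range under Pre_ (weights ≠ []); pyGetD is exact there
  let init : Int × Int := (1, PySem.List.pyGetD s 0 0 + 4)
  let r := (PySem.List.pyRange 1 (s.length : Int)).foldl
      (fun st i =>
        let w := PySem.List.pyGetD s i 0
        if w > st.2 then (st.1 + 1, w + 4) else st) init
  r.1

-- ===== PORT B =====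
-- transliteration of Source B's _bisect_right (a[mid] is always in range: mid < hi ≤ len a)
def pvBisect (a : List Int) (x : Int) (lo hi : Nat) : Nat :=
  if _h : lo < hi then
    let mid := (lo + hi) / 2
    if PySem.List.pyGetD a (mid : Int) 0 ≤ x then pvBisect a x (mid + 1) hi
    else pvBisect a x lo mid
  else lo
termination_by hi - lo
decreasing_by all_goals omega

-- Source B's while-loop; fuel = s.length is a totality guard only (i strictly increases each
-- iteration on the sorted list, so the fuel is provably sufficient — see bLoopB_eq below)
def bLoopB (s : List Int) : Nat → Int → Nat → Int
  | 0, count, _ => count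
  | fuel + 1, count, i =>
    if i < s.length then
      bLoopB s fuel (count + 1) (pvBisect s (PySem.List.pyGetD s (i : Int) 0 + 4) 0 s.length)
    else count

def get_number_of_containers_alt (weights : List Int) : Int :=
  let s := PySem.List.sorted weights (fun x => x) false
  bLoopB s s.length 0 0

-- ===== PRECONDITION & SPEC =====
-- A reads the first element and so raises IndexError on the empty list; Pre_ excludes exactly that input.
def Pre_get_number_of_containers (weights : List Int) : Prop := weights ≠ []
instance (weights : List Int) : Decidable (Pre_get_number_of_containers weights) := by
  unfold Pre_get_number_of_containers; infer_instance
def pvWitness_get_number_of_containers : List Int := [1, 7, 2]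

def Spec_get_number_of_containers (weights : List Int) (out : Int) : Prop :=
  out = get_number_of_containers_alt weights
instance (weights : List Int) (out : Int) : Decidable (Spec_get_number_of_containers weights out) := by
  unfold Spec_get_number_of_containers; infer_instance

-- ===== CLAIM (what is proved, stated in full; the proofs are below) =====
def Claim_equal_get_number_of_containers : Prop :=
  ∀ (weights : List Int), Dom_get_number_of_containers weights →
    Pre_get_number_of_containers weights →
    Spec_get_number_of_containers weights (get_number_of_containers weights)

-- ===== LEMMAS AND PROOFS =====

-- the common greedy-block count both programs compute on the sorted list
def pvBlocksGo (lim : Int) : List Int → Int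
  | [] => 0
  | y :: ys => if y > lim then 1 + pvBlocksGo (y + 4) ys else pvBlocksGo lim ys

def pvBlocks : List Int → Int
  | [] => 0
  | x :: xs => 1 + pvBlocksGo (x + 4) xs

lemma foldA_fst (xs : List Int) : ∀ (c lim : Int),
    ((xs.foldl (fun st w => if w > st.2 then (st.1 + 1, w + 4) else st) (c, lim)).1
      = c + pvBlocksGo lim xs) := by
  induction xs with
  | nil => intro c lim; simp [pvBlocksGo]
  | cons a xs ih =>
    intro c lim
    by_cases h : a > lim
    · simp only [List.foldl_cons, pvBlocksGo, if_pos h, ih]; ring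
    · simp only [List.foldl_cons, pvBlocksGo, if_neg h, ih]

lemma pvBisect_spec (s : List Int) (x : Int) (lo hi : Nat)
    (hs : List.Pairwise (· ≤ ·) s)
    (hlh : lo ≤ hi) (hhn : hi ≤ s.length)
    (hlow : ∀ (j : Nat) (hj : j < s.length), j < lo → s[j] ≤ x)
    (hhigh : ∀ (j : Nat) (hj : j < s.length), hi ≤ j → x < s[j]) :
    lo ≤ pvBisect s x lo hi ∧ pvBisect s x lo hi ≤ hi ∧
    (∀ (j : Nat) (hj : j < s.length), j < pvBisect s x lo hi → s[j] ≤ x) ∧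
    (∀ (j : Nat) (hj : j < s.length), pvBisect s x lo hi ≤ j → x < s[j]) := by
  rw [pvBisect]
  by_cases h : lo < hi
  · simp only [dif_pos h]
    have hmid1 : (lo + hi) / 2 < hi := by omega
    have hmid0 : lo ≤ (lo + hi) / 2 := by omega
    have hmlen : (lo + hi) / 2 < s.length := by omega
    have hget : PySem.List.pyGetD s (((lo + hi) / 2 : Nat) : Int) 0 = s[(lo + hi) / 2] := by
      rw [PySem.List.pyGetD_natCast, List.getD_eq_getElem?_getD, List.getElem?_eq_getElem hmlen]
      rfl
    have hmono : ∀ (p q : Nat) (hp : p < s.length) (hq : q < s.length), p ≤ q → s[p] ≤ s[q] := by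
      intro p q hp hq hpq
      rcases Nat.lt_or_ge p q with h' | h'
      · exact List.pairwise_iff_getElem.mp hs p q hp hq h'
      · have : p = q := by omega
        subst this; exact le_refl _
    by_cases hm : PySem.List.pyGetD s (((lo + hi) / 2 : Nat) : Int) 0 ≤ x
    · simp only [if_pos hm]
      have hrec := pvBisect_spec s x ((lo + hi) / 2 + 1) hi hs (by omega) hhn
        (by
          intro j hj hjlt
          have hjm : j ≤ (lo + hi) / 2 := by omega
          calc s[j] ≤ s[(lo + hi) / 2] := hmono j _ hj hmlen hjm
            _ ≤ x := by rw [← hget]; exact hm)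
        hhigh
      exact ⟨by omega, hrec.2.1, hrec.2.2.1, hrec.2.2.2⟩
    · simp only [if_neg hm]
      have hm' : x < s[(lo + hi) / 2] := by rw [← hget]; exact lt_of_not_ge hm
      have hrec := pvBisect_spec s x lo ((lo + hi) / 2) hs (by omega) (by omega)
        hlow
        (by
          intro j hj hjm
          calc x < s[(lo + hi) / 2] := hm'
            _ ≤ s[j] := hmono _ j hmlen hj hjm)
      exact ⟨hrec.1, by omega, hrec.2.2.1, hrec.2.2.2⟩
  · simp only [dif_neg h]
    have : lo = hi := by omega
    refine ⟨le_refl _, by omega, ?_, ?_⟩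
    · intro j hj hjlt; exact hlow j hj hjlt
    · intro j hj hjl; exact hhigh j hj (by omega)
termination_by hi - lo
decreasing_by all_goals omega

lemma blocksGo_skip (lim : Int) (xs : List Int) : ∀ (ys : List Int),
    (∀ a ∈ xs, a ≤ lim) → (∀ y ∈ ys.head?, lim < y) →
    pvBlocksGo lim (xs ++ ys) = pvBlocks ys := by
  induction xs with
  | nil =>
    intro ys _ hys
    cases ys with
    | nil => simp [pvBlocksGo, pvBlocks]
    | cons y ys' =>
      have hy : lim < y := hys y (by simp)
      simp only [List.nil_append, pvBlocksGo, pvBlocks, if_pos (by omega : y > lim)]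
  | cons a xs ih =>
    intro ys hxs hys
    have ha : a ≤ lim := hxs a (by simp)
    simp only [List.cons_append, pvBlocksGo, if_neg (by omega : ¬ a > lim)]
    exact ih ys (fun b hb => hxs b (by simp [hb])) hys

lemma bLoopB_eq (s : List Int) (hs : List.Pairwise (· ≤ ·) s) :
    ∀ (fuel i : Nat) (c : Int), s.length - i ≤ fuel →
      bLoopB s fuel c i = c + pvBlocks (s.drop i) := by
  intro fuel
  induction fuel with
  | zero =>
    intro i c hf
    have : s.length ≤ i := by omega
    rw [List.drop_eq_nil_of_le this]
    simp [bLoopB, pvBlocks]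
  | succ fuel ih =>
    intro i c hf
    by_cases hi : i < s.length
    · have hget : PySem.List.pyGetD s (i : Int) 0 = s[i] := by
        rw [PySem.List.pyGetD_natCast, List.getD_eq_getElem?_getD, List.getElem?_eq_getElem hi]
        rfl
      have hspec := pvBisect_spec s (PySem.List.pyGetD s (i : Int) 0 + 4) 0 s.length hs
        (Nat.zero_le _) (le_refl _)
        (by intro j hj hjlt; omega)
        (by intro j hj hjl; omega)
      obtain ⟨-, hrn, hle, hgt⟩ := hspec
      have hxi : s[i] ≤ PySem.List.pyGetD s (i : Int) 0 + 4 := by rw [hget]; omega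
      have hir : i < pvBisect s (PySem.List.pyGetD s (i : Int) 0 + 4) 0 s.length := by
        by_contra hir
        exact absurd (hgt i hi (Nat.le_of_not_lt hir)) (by omega)
      simp only [bLoopB, if_pos hi]
      rw [ih (pvBisect s (PySem.List.pyGetD s (i : Int) 0 + 4) 0 s.length) (c + 1) (by omega)]
      -- pvBlocks (drop i s) = 1 + pvBlocks (drop r s)
      have hdrop : s.drop i = s[i] :: s.drop (i + 1) := List.drop_eq_getElem_cons hi
      have hsplit : s.drop (i + 1) =
          (s.drop (i + 1)).take (pvBisect s (PySem.List.pyGetD s (i : Int) 0 + 4) 0 s.length - (i + 1))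
            ++ s.drop (pvBisect s (PySem.List.pyGetD s (i : Int) 0 + 4) 0 s.length) := by
        conv_lhs => rw [← List.take_append_drop
          (pvBisect s (PySem.List.pyGetD s (i : Int) 0 + 4) 0 s.length - (i + 1)) (s.drop (i + 1))]
        rw [List.drop_drop,
          show i + 1 + (pvBisect s (PySem.List.pyGetD s (i : Int) 0 + 4) 0 s.length - (i + 1))
              = pvBisect s (PySem.List.pyGetD s (i : Int) 0 + 4) 0 s.length from by omega]
      have hblocks : pvBlocks (s.drop i) =
          1 + pvBlocks (s.drop (pvBisect s (PySem.List.pyGetD s (i : Int) 0 + 4) 0 s.length)) := by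
        rw [hdrop]
        show 1 + pvBlocksGo (s[i] + 4) (s.drop (i + 1)) = _
        congr 1
        rw [hsplit]
        have hlim : s[i] + 4 = PySem.List.pyGetD s (i : Int) 0 + 4 := by rw [hget]
        rw [hlim]
        apply blocksGo_skip
        · intro a ha
          rcases List.mem_iff_getElem.mp ha with ⟨k, hk, hak⟩
          have hk2 := hk
          rw [List.length_take, List.length_drop] at hk2
          have hk' : k < (s.drop (i + 1)).length := by
            rw [List.length_drop]; omega
          have hkr : i + 1 + k < pvBisect s (PySem.List.pyGetD s (i : Int) 0 + 4) 0 s.length := by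
            omega
          rw [List.getElem_take, List.getElem_drop] at hak
          rw [← hak]
          exact hle (i + 1 + k) (by omega) hkr
        · intro y hy
          rcases Nat.lt_or_ge (pvBisect s (PySem.List.pyGetD s (i : Int) 0 + 4) 0 s.length) s.length with hrl | hrl
          · rw [List.drop_eq_getElem_cons hrl] at hy
            simp only [List.head?_cons, Option.mem_some_iff] at hy
            subst hy
            exact hgt _ hrl (le_refl _)
          · rw [List.drop_eq_nil_of_le hrl] at hy
            simp at hy
      rw [hblocks]
      ring
    · rw [List.drop_eq_nil_of_le (by omega)]
      simp [bLoopB, if_neg hi, pvBlocks]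

-- ===== VERDICT (by name: the statement is the Claim_ definition above) =====
theorem get_number_of_containers_spec : Claim_equal_get_number_of_containers := by
  intro weights _ hpre
  unfold Spec_get_number_of_containers
  unfold get_number_of_containers get_number_of_containers_alt
  set s := PySem.List.sorted weights (fun x => x) false with hsdef
  have hs : List.Pairwise (· ≤ ·) s := by
    have := PySem.List.sorted_pairwise weights (fun x => x)
    simpa using this
  have hne : s ≠ [] := by
    rw [hsdef, Ne, PySem.List.sorted_eq_nil_iff]
    exact hpre
  obtain ⟨x0, t, hst⟩ := List.exists_cons_of_ne_nil hne
  -- B side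
  rw [bLoopB_eq s hs s.length 0 0 (by omega)]
  -- A side: turn the range-fold into a fold over s.drop 1
  have hfold : (PySem.List.pyRange 1 (s.length : Int)).foldl
      (fun (st : Int × Int) (i : Int) =>
        if PySem.List.pyGetD s i 0 > st.2 then (st.1 + 1, PySem.List.pyGetD s i 0 + 4) else st)
      (1, PySem.List.pyGetD s 0 0 + 4)
      = (s.drop 1).foldl (fun (st : Int × Int) (w : Int) =>
          if w > st.2 then (st.1 + 1, w + 4) else st) (1, PySem.List.pyGetD s 0 0 + 4) :=
    PySem.List.foldl_pyRange_pyGetD' s 0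
      (fun (st : Int × Int) (w : Int) => if w > st.2 then (st.1 + 1, w + 4) else st)
      ((1 : Int), PySem.List.pyGetD s 0 0 + 4) (a := 1) (by norm_num)
  simp only [hfold, foldA_fst]
  have h00 : PySem.List.pyGetD s 0 0 = x0 := by
    rw [hst]
    rw [show ((0 : Int)) = ((0 : Nat) : Int) by norm_num, PySem.List.pyGetD_natCast]
    rfl
  rw [h00, hst]
  simp [pvBlocks, List.drop]
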